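-- pv_equiv track=rewrite | github.com/NecerLixin/MedicalInformationExtraction | my_utils.py | insert_asterisks
-- ===== SOURCE A (Python) =====
-- def insert_asterisks(text, labels):
--     entity_pos = []
--     tokens = list(text)
--     new_tokens = []
--     i = 0
--     while i < len(tokens):
--         if labels[i] == "B-Symptom":
--             e = [len(new_tokens)]
--             new_tokens.append("*")
--             begin = i
--             end = i + 1
--             while end < len(tokens) and labels[end] == "I-Symptom":
--                 end += 1
--             e.append(e[0] + end - begin + 1)
--             entity_pos.append(e)
--             for j in range(begin, end):
--                 new_tokens.append(tokens[j])
--             new_tokens.append("*")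
--             i = end - 1
--         else:
--             new_tokens.append(tokens[i])
--         i += 1
--     return new_tokens, entity_pos
-- ===== SOURCE B (Python) =====
-- def insert_asterisks(text, labels):
--     new_tokens = []
--     entity_pos = []
--     open_pos = None
--     for tok, lab in zip(text, labels):
--         if lab == "B-Symptom":
--             if open_pos is not None:
--                 entity_pos.append([open_pos, len(new_tokens)])
--                 new_tokens.append("*")
--             new_tokens.append("*")
--             open_pos = len(new_tokens) - 1
--             new_tokens.append(tok)
--         elif lab == "I-Symptom" and open_pos is not None:
--             new_tokens.append(tok)
--         else:
--             if open_pos is not None: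
--                 entity_pos.append([open_pos, len(new_tokens)])
--                 new_tokens.append("*")
--                 open_pos = None
--             new_tokens.append(tok)
--     if open_pos is not None:
--         entity_pos.append([open_pos, len(new_tokens)])
--         new_tokens.append("*")
--     return new_tokens, entity_pos
-- ===== Notes on version B (the rewrite author's own statement) =====
-- stated objective: simpler
-- what changed: Replaces A's index-jumping outer loop with a nested lookahead while and a range re-copy by a single flat pass over zip(text, labels) that keeps an in-entity open position and closes the pending entity lazily.
import Mathlib
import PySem

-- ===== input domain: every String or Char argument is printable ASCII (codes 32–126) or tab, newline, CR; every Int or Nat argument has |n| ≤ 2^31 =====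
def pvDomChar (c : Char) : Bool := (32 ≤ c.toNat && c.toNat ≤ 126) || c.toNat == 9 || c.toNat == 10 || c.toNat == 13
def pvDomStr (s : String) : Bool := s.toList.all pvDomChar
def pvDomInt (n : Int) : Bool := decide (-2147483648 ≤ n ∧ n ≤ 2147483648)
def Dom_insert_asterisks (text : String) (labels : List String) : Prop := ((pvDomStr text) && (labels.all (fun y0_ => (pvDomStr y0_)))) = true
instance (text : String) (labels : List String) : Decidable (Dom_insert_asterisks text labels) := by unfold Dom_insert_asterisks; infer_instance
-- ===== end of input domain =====

-- B replaces A's nested lookahead loop with a single flat pass keeping an open-entity position; same return value on all inputs where A returns.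

-- ===== PORT A =====
-- inner 'while end < len(tokens) and labels[end] == "I-Symptom": end += 1'
def pvFindEnd (labels : List String) (n : Nat) (m : Nat) : Nat :=
  if m < n ∧ labels.getD m "" == "I-Symptom" then pvFindEnd labels n (m + 1) else m
termination_by n - m
decreasing_by omega

theorem pvFindEnd_ge (labels : List String) (n m : Nat) : m ≤ pvFindEnd labels n m := by
  unfold pvFindEnd
  split
  · have := pvFindEnd_ge labels n (m + 1); omega
  · exact le_refl m
termination_by n - m
decreasing_by omega

-- A's outer while loop, index i; labels[i] is in range on every input Pre_ admits (A raises otherwise)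
def pvALoop (tokens labels : List String) (i : Nat)
    (nt : List String) (ep : List (List Int)) : List String × List (List Int) :=
  if h : i < tokens.length then
    if labels.getD i "" == "B-Symptom" then
      let p := nt.length
      let e := pvFindEnd labels tokens.length (i + 1)
      let entity : List Int := [(p : Int), (p : Int) + (e : Int) - (i : Int) + 1]
      pvALoop tokens labels e
        (nt ++ ["*"] ++ (List.range' i (e - i)).map (fun j => tokens.getD j "") ++ ["*"])
        (ep ++ [entity])
    else
      pvALoop tokens labels (i + 1) (nt ++ [tokens.getD i ""]) ep
  else (nt, ep)
termination_by tokens.length - i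
decreasing_by
  · have := pvFindEnd_ge labels tokens.length (i + 1); omega
  · omega

def insert_asterisks (text : String) (labels : List String) : List String × List (List Int) :=
  pvALoop (text.toList.map (fun c => String.mk [c])) labels 0 [] []

-- ===== PORT B =====
-- single pass over zip(text, labels); state = (new_tokens, entity_pos, open position of pending entity)
def pvBLoop : List (String × String) → List String → List (List Int) → Option Nat →
    List String × List (List Int)
  | [], nt, ep, o =>
    match o with
    | some p => (nt ++ ["*"], ep ++ [[(p : Int), (nt.length : Int)]])
    | none => (nt, ep)
  | (tok, lab) :: rest, nt, ep, o =>
    if lab == "B-Symptom" then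
      match o with
      | some p =>
        pvBLoop rest ((nt ++ ["*"]) ++ ["*", tok]) (ep ++ [[(p : Int), (nt.length : Int)]])
          (some (nt ++ ["*"]).length)
      | none => pvBLoop rest (nt ++ ["*", tok]) ep (some nt.length)
    else if lab == "I-Symptom" && o.isSome then
      pvBLoop rest (nt ++ [tok]) ep o
    else
      match o with
      | some p =>
        pvBLoop rest ((nt ++ ["*"]) ++ [tok]) (ep ++ [[(p : Int), (nt.length : Int)]]) none
      | none => pvBLoop rest (nt ++ [tok]) ep none

def insert_asterisks_alt (text : String) (labels : List String) : List String × List (List Int) :=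
  pvBLoop ((text.toList.map (fun c => String.mk [c])).zip labels) [] [] none

-- ===== PRECONDITION & SPEC =====
-- A accesses labels[i] for every i < len(text) and raises IndexError when labels is shorter; Pre_ excludes exactly those inputs.
def Pre_insert_asterisks (text : String) (labels : List String) : Prop :=
  text.toList.length ≤ labels.length
instance (text : String) (labels : List String) : Decidable (Pre_insert_asterisks text labels) := by
  unfold Pre_insert_asterisks; infer_instance

def pvWitness_insert_asterisks : String × List String :=
  ("abcd", ["O", "B-Symptom", "I-Symptom", "O"])

def Spec_insert_asterisks (text : String) (labels : List String)
    (out : List String × List (List Int)) : Prop := out = insert_asterisks_alt text labels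
instance (text : String) (labels : List String) (out : List String × List (List Int)) :
    Decidable (Spec_insert_asterisks text labels out) := by
  unfold Spec_insert_asterisks; infer_instance

-- ===== CLAIM (what is proved, stated in full; the proofs are below) =====
def Claim_equal_insert_asterisks : Prop := ∀ (text : String) (labels : List String), Dom_insert_asterisks text labels → Pre_insert_asterisks text labels → Spec_insert_asterisks text labels (insert_asterisks text labels)


-- ===== LEMMAS AND PROOFS =====

theorem pvFindEnd_le (labels : List String) (n m : Nat) (h : m ≤ n) : pvFindEnd labels n m ≤ n := by
  unfold pvFindEnd
  split
  · exact pvFindEnd_le labels n (m + 1) (by omega)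
  · exact h
termination_by n - m
decreasing_by omega

theorem pvFindEnd_body (labels : List String) (n m : Nat) (k : Nat)
    (h1 : m ≤ k) (h2 : k < pvFindEnd labels n m) : labels.getD k "" = "I-Symptom" := by
  unfold pvFindEnd at h2
  by_cases hc : m < n ∧ labels.getD m "" == "I-Symptom"
  · rw [if_pos hc] at h2
    rcases Nat.eq_or_lt_of_le h1 with rfl | hlt
    · exact eq_of_beq hc.2
    · exact pvFindEnd_body labels n (m + 1) k hlt h2
  · rw [if_neg hc] at h2; omega
termination_by n - m
decreasing_by omega

theorem pvFindEnd_stop (labels : List String) (n m : Nat)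
    (h : pvFindEnd labels n m < n) : ¬ labels.getD (pvFindEnd labels n m) "" = "I-Symptom" := by
  unfold pvFindEnd at *
  by_cases hc : m < n ∧ labels.getD m "" == "I-Symptom"
  · rw [if_pos hc] at *; exact pvFindEnd_stop labels n (m + 1) h
  · rw [if_neg hc] at *
    intro he
    exact hc ⟨h, beq_iff_eq.mpr he⟩
termination_by n - m
decreasing_by omega

-- drop-zip unfolds one step
theorem pvZtail_cons (tokens labels : List String) (j : Nat)
    (h1 : j < tokens.length) (h2 : j < labels.length) :
    (tokens.drop j).zip (labels.drop j) =
      (tokens.getD j "", labels.getD j "") :: (tokens.drop (j + 1)).zip (labels.drop (j + 1)) := by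
  rw [List.drop_eq_getElem_cons h1, List.drop_eq_getElem_cons h2, List.zip_cons_cons]
  congr <;> simp [List.getD, List.getElem?_eq_getElem, h1, h2]

-- B consumes a run of "I-Symptom" labels with an open entity by appending the tokens
theorem pvBLoop_run (tokens labels : List String) (hl : tokens.length ≤ labels.length)
    (e : Nat) (he : e ≤ tokens.length)
    (j : Nat) (hj : j ≤ e)
    (hrun : ∀ k, j ≤ k → k < e → labels.getD k "" = "I-Symptom")
    (nt : List String) (ep : List (List Int)) (p : Nat) :
    pvBLoop ((tokens.drop j).zip (labels.drop j)) nt ep (some p) =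
      pvBLoop ((tokens.drop e).zip (labels.drop e))
        (nt ++ (List.range' j (e - j)).map (fun k => tokens.getD k "")) ep (some p) := by
  rcases Nat.eq_or_lt_of_le hj with rfl | hlt
  · simp
  · rw [pvZtail_cons tokens labels j (by omega) (by omega)]
    have hlab : labels[j]?.getD "" = "I-Symptom" := by
      simpa [List.getD] using hrun j (le_refl j) hlt
    rw [pvBLoop]
    rw [if_neg (by simp [hlab]), if_pos (by simp [hlab])]
    rw [pvBLoop_run tokens labels hl e he (j + 1) (by omega)
      (fun k hk1 hk2 => hrun k (by omega) hk2) (nt ++ [tokens.getD j ""]) ep p]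
    have : e - j = (e - (j + 1)) + 1 := by omega
    rw [this, List.range'_succ]
    simp
termination_by e - j

-- at a non-"I-Symptom" boundary (or end of input) B closes the pending entity first
theorem pvBLoop_close (tokens labels : List String) (hl : tokens.length ≤ labels.length)
    (e : Nat) (he : e ≤ tokens.length)
    (hstop : e < tokens.length → ¬ labels.getD e "" = "I-Symptom")
    (nt : List String) (ep : List (List Int)) (p : Nat) :
    pvBLoop ((tokens.drop e).zip (labels.drop e)) nt ep (some p) =
      pvBLoop ((tokens.drop e).zip (labels.drop e)) (nt ++ ["*"])
        (ep ++ [[(p : Int), (nt.length : Int)]]) none := by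
  rcases Nat.eq_or_lt_of_le he with rfl | hlt
  · simp [pvBLoop]
  · rw [pvZtail_cons tokens labels e (by omega) (by omega)]
    have hlab : ¬ labels[e]?.getD "" = "I-Symptom" := by
      simpa [List.getD] using hstop hlt
    by_cases hb : labels[e]?.getD "" = "B-Symptom"
    · rw [pvBLoop, pvBLoop]
      rw [if_pos (by simp [hb]), if_pos (by simp [hb])]
    · rw [pvBLoop, pvBLoop]
      rw [if_neg (by simpa using hb)]
      rw [if_neg (by simp [hlab])]
      simp
      exact fun h => absurd h hb

-- main invariant: A's loop from index i with no pending entity equals B's loop on the suffix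
theorem pvMain (tokens labels : List String) (hl : tokens.length ≤ labels.length)
    (i : Nat) (hi : i ≤ tokens.length) (nt : List String) (ep : List (List Int)) :
    pvALoop tokens labels i nt ep =
      pvBLoop ((tokens.drop i).zip (labels.drop i)) nt ep none := by
  rcases Nat.eq_or_lt_of_le hi with rfl | hlt
  · simp [pvALoop, pvBLoop]
  · rw [pvZtail_cons tokens labels i (by omega) (by omega)]
    rw [pvALoop, dif_pos hlt]
    by_cases hb : labels[i]?.getD "" = "B-Symptom"
    · rw [if_pos (by simp [List.getD, hb])]
      rw [pvBLoop, if_pos (by simp [hb])]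
      set e := pvFindEnd labels tokens.length (i + 1) with hedef
      have hge : i + 1 ≤ e := pvFindEnd_ge labels tokens.length (i + 1)
      have hle : e ≤ tokens.length := pvFindEnd_le labels tokens.length (i + 1) (by omega)
      rw [pvBLoop_run tokens labels hl e hle (i + 1) hge
        (fun k hk1 hk2 => pvFindEnd_body labels tokens.length (i + 1) k hk1 hk2)
        (nt ++ ["*", tokens.getD i ""]) ep nt.length]
      rw [pvBLoop_close tokens labels hl e hle
        (fun h => pvFindEnd_stop labels tokens.length (i + 1) h)
        _ ep nt.length]
      rw [pvMain tokens labels hl e hle]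
      have hspan : nt ++ ["*"] ++ (List.range' i (e - i)).map (fun j => tokens.getD j "") ++ ["*"] =
          nt ++ ["*", tokens.getD i ""] ++ (List.range' (i + 1) (e - (i + 1))).map
            (fun k => tokens.getD k "") ++ ["*"] := by
        have : e - i = (e - (i + 1)) + 1 := by omega
        rw [this, List.range'_succ]
        simp
      have hlen : ((nt ++ ["*", tokens.getD i ""] ++ (List.range' (i + 1) (e - (i + 1))).map
          (fun k => tokens.getD k "")).length : Int) = (nt.length : Int) + (e : Int) - (i : Int) + 1 := by
        simp; omega
      rw [hspan, hlen]
    · rw [if_neg (by simp [List.getD, hb])]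
      rw [pvBLoop, if_neg (by simpa using hb), if_neg (by simp)]
      exact pvMain tokens labels hl (i + 1) (by omega) (nt ++ [tokens.getD i ""]) ep
termination_by tokens.length - i
decreasing_by
  · have := pvFindEnd_ge labels tokens.length (i + 1); omega
  · omega

-- ===== VERDICT (by name: the statement is the Claim_ definition above) =====
theorem insert_asterisks_spec : Claim_equal_insert_asterisks := by
  intro text labels _ hpre
  unfold Spec_insert_asterisks insert_asterisks insert_asterisks_alt
  have hlen : (text.toList.map (fun c => String.mk [c])).length ≤ labels.length := by
    simpa using hpre
  simpa using pvMain (text.toList.map (fun c => String.mk [c])) labels hlen 0 (by omega) [] []
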